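-- pv_equiv track=rewrite | github.com/JacobSandin/koha-doc-translator | status.py | get_translatable_content
-- ===== SOURCE A (Python) =====
-- def get_translatable_content(rst_content):
--     """Extract translatable content from RST file"""
--     lines = rst_content.split('\n')
--     translatable_lines = []
--     current_line = []
--     in_ref = False
--
--     for i, line in enumerate(lines):
--         line = line.strip()
--         if not line:  # Skip empty lines
--             if current_line:  # End of multiline
--                 translatable_lines.append(' '.join(current_line))
--                 current_line = []
--             continue
--
--         if line.startswith('..'):  # Skip RST comments
--             continue
--         if line.startswith('|') and line.endswith('|'):  # Skip RST substitutions
--             continue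
--
--         # Handle RST references
--         if ':ref:' in line:
--             in_ref = True
--             current_line.append(line)
--             continue
--
--         if in_ref:
--             current_line.append(line)
--             if line.endswith('`'):  # End of reference
--                 in_ref = False
--             continue
--
--         if i < len(lines) - 1:  # Check next line for section headers
--             next_line = lines[i + 1].strip()
--             if next_line and all(c == '=' for c in next_line):  # Skip section headers
--                 continue
--             if next_line and all(c == '-' for c in next_line):  # Skip subsection headers
--                 continue
--             if next_line and all(c == '~' for c in next_line):  # Skip subsubsection headers
--                 continue
--         if all(c == '=' for c in line) or all(c == '-' for c in line) or all(c == '~' for c in line):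
--             continue  # Skip section header lines
--
--         # Add non-empty lines to current multiline
--         if line:
--             current_line.append(line)
--
--     # Add any remaining lines
--     if current_line:
--         translatable_lines.append(' '.join(current_line))
--
--     return translatable_lines
-- ===== SOURCE B (Python) =====
-- def _is_rule(line):
--     """Line made entirely of one of '=', '-', '~' (a section underline)."""
--     return line != '' and line[0] in '=-~' and line == line[0] * len(line)
--
--
-- def _filter_block(blk, in_ref):
--     """Keep the translatable lines of one blank-free block of stripped lines."""
--     kept = []
--     for j, line in enumerate(blk):
--         if line.startswith('..'):
--             continue
--         if line.startswith('|') and line.endswith('|'):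
--             continue
--         if ':ref:' in line:
--             in_ref = True
--             kept.append(line)
--             continue
--         if in_ref:
--             kept.append(line)
--             if line.endswith('`'):
--                 in_ref = False
--             continue
--         nxt = blk[j + 1] if j + 1 < len(blk) else ''
--         if _is_rule(nxt):
--             continue
--         if _is_rule(line):
--             continue
--         kept.append(line)
--     return kept, in_ref
--
--
-- def get_translatable_content(rst_content):
--     """Extract translatable content from RST file (block-wise decomposition)."""
--     blocks = []
--     block = []
--     for raw in rst_content.split('\n'):
--         s = raw.strip()
--         if s:
--             block.append(s)
--         elif block:
--             blocks.append(block)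
--             block = []
--     if block:
--         blocks.append(block)
--
--     out = []
--     in_ref = False
--     for blk in blocks:
--         kept, in_ref = _filter_block(blk, in_ref)
--         if kept:
--             out.append(' '.join(kept))
--     return out
-- ===== Notes on version B (the rewrite author's own statement) =====
-- stated objective: alternative
-- what changed: A is one flat indexed loop over all lines with a flush-on-blank accumulator and a global lines[i+1] lookahead; B first groups the stripped lines into blank-separated blocks, then filters each block independently (lookahead stays inside the block, underlines recognised by a char-repetition helper) and joins each block's kept lines.
import Mathlib
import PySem

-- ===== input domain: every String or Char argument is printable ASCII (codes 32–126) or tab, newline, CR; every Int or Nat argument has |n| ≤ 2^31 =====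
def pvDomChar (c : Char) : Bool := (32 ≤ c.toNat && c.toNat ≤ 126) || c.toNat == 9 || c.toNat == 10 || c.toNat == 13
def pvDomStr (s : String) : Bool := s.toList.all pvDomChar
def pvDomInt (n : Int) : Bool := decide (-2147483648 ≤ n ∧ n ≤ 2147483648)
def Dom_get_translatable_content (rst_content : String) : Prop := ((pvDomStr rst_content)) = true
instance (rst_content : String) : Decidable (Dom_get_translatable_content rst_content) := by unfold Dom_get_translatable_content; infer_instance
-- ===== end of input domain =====

-- A = one flat loop with flush-on-blank and a lines[i+1] lookahead; B = group the stripped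
-- lines into blank-separated blocks first, then filter each block. Proved equal on all inputs.

-- ===== PORT A =====
-- all(c == ch for c in line)
def pvAll (ch : Char) (s : String) : Bool := s.toList.all (fun c => c == ch)

-- the main for-loop of A; state = (translatable_lines, current_line, in_ref); lines[i+1] = head of rest
def pvAGo : List String → List String → List String → Bool → List String
  | [], acc, cur, _in_ref =>
      if cur ≠ [] then acc ++ [PySem.Str.join " " cur] else acc
  | l :: rest, acc, cur, in_ref =>
      let line := PySem.Str.strip l
      if line = "" then
        if cur ≠ [] then pvAGo rest (acc ++ [PySem.Str.join " " cur]) [] in_ref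
        else pvAGo rest acc cur in_ref
      else if PySem.Str.startswith line ".." then pvAGo rest acc cur in_ref
      else if PySem.Str.startswith line "|" && PySem.Str.endswith line "|" then pvAGo rest acc cur in_ref
      else if PySem.Str.isIn ":ref:" line then pvAGo rest acc (cur ++ [line]) true
      else if in_ref then
        pvAGo rest acc (cur ++ [line]) (if PySem.Str.endswith line "`" then false else in_ref)
      else
        let hdr : Bool :=
          match rest with
          | [] => false
          | nxt :: _ =>
              (PySem.Str.strip nxt != "") &&
                (pvAll '=' (PySem.Str.strip nxt) || pvAll '-' (PySem.Str.strip nxt) ||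
                  pvAll '~' (PySem.Str.strip nxt))
        if hdr then pvAGo rest acc cur in_ref
        else if pvAll '=' line || pvAll '-' line || pvAll '~' line then pvAGo rest acc cur in_ref
        else if line ≠ "" then pvAGo rest acc (cur ++ [line]) in_ref
        else pvAGo rest acc cur in_ref

def get_translatable_content (rst_content : String) : List String :=
  pvAGo ((PySem.Str.split? rst_content "\n").getD []) [] [] false

-- ===== PORT B =====
-- line != '' and line[0] in '=-~' and line == line[0] * len(line)
def pvIsRule (line : String) : Bool :=
  (line != "") && ("=-~".toList.contains (line.toList.headD ' ')) &&
    (line.toList == List.replicate line.toList.length (line.toList.headD ' '))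

-- first loop of B: group stripped non-blank lines into blocks
def pvBlocksGo : List String → List (List String) → List String → List (List String)
  | [], blocks, block => if block ≠ [] then blocks ++ [block] else blocks
  | raw :: rest, blocks, block =>
      let s := PySem.Str.strip raw
      if s ≠ "" then pvBlocksGo rest blocks (block ++ [s])
      else if block ≠ [] then pvBlocksGo rest (blocks ++ [block]) []
      else pvBlocksGo rest blocks block

-- _filter_block: keep the translatable lines of one block; blk[j+1] = head of rest
def pvFilterGo : List String → List String → Bool → List String × Bool
  | [], kept, in_ref => (kept, in_ref)
  | line :: rest, kept, in_ref =>
      if PySem.Str.startswith line ".." then pvFilterGo rest kept in_ref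
      else if PySem.Str.startswith line "|" && PySem.Str.endswith line "|" then pvFilterGo rest kept in_ref
      else if PySem.Str.isIn ":ref:" line then pvFilterGo rest (kept ++ [line]) true
      else if in_ref then
        pvFilterGo rest (kept ++ [line]) (if PySem.Str.endswith line "`" then false else in_ref)
      else
        let nxt := rest.headD ""
        if pvIsRule nxt then pvFilterGo rest kept in_ref
        else if pvIsRule line then pvFilterGo rest kept in_ref
        else pvFilterGo rest (kept ++ [line]) in_ref

-- second loop of B: filter each block, threading in_ref, join kept lines
def pvBOut : List (List String) → List String → Bool → List String
  | [], out, _in_ref => out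
  | blk :: bs, out, in_ref =>
      let p := pvFilterGo blk [] in_ref
      pvBOut bs (if p.1 ≠ [] then out ++ [PySem.Str.join " " p.1] else out) p.2

def get_translatable_content_alt (rst_content : String) : List String :=
  pvBOut (pvBlocksGo ((PySem.Str.split? rst_content "\n").getD []) [] []) [] false

-- ===== PRECONDITION & SPEC =====
def Spec_get_translatable_content (rst_content : String) (out : List String) : Prop := out = get_translatable_content_alt rst_content
instance (rst_content : String) (out : List String) : Decidable (Spec_get_translatable_content rst_content out) := by unfold Spec_get_translatable_content; infer_instance

-- ===== CLAIM (what is proved, stated in full; the proofs are below) =====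
def Claim_equal_get_translatable_content : Prop := ∀ (rst_content : String), Dom_get_translatable_content rst_content → Spec_get_translatable_content rst_content (get_translatable_content rst_content)

-- ===== LEMMAS AND PROOFS =====

-- proof-side abbreviations
def pvEmit (k : List String) : List String := if k ≠ [] then [PySem.Str.join " " k] else []

def pvP (x : String) : Bool := PySem.Str.strip x != ""

-- A's mid-block state, expressed in B's terms: finish filtering the rest of the current
-- block (the non-blank prefix), then run B on the remaining blocks.
def pvBOutFrom (ls : List String) (acc cur : List String) (r : Bool) : List String :=
  let p := pvFilterGo ((ls.takeWhile pvP).map PySem.Str.strip) cur r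
  pvBOut (pvBlocksGo (ls.dropWhile pvP) [] []) (acc ++ pvEmit p.1) p.2

theorem pvBlocksGo_acc (ls : List String) (blocks : List (List String)) (block : List String) :
    pvBlocksGo ls blocks block = blocks ++ pvBlocksGo ls [] block := by
  induction ls generalizing blocks block with
  | nil =>
    simp only [pvBlocksGo]
    split_ifs <;> simp
  | cons l rest ih =>
    simp only [pvBlocksGo]
    split_ifs with h1 h2
    · exact ih _ _
    · rw [ih (blocks ++ [block]) [], ih ([] ++ [block]) []]; simp
    · exact ih _ _

theorem pvBlocksGo_decomp (ls : List String) (block : List String) :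
    pvBlocksGo ls [] block =
      (if block ++ (ls.takeWhile pvP).map PySem.Str.strip = [] then []
       else [block ++ (ls.takeWhile pvP).map PySem.Str.strip]) ++
      pvBlocksGo (ls.dropWhile pvP) [] [] := by
  induction ls generalizing block with
  | nil =>
    simp only [pvBlocksGo, List.takeWhile_nil, List.dropWhile_nil, List.map_nil, List.append_nil]
    split_ifs with h1 h2 <;> simp_all
  | cons l rest ih =>
    by_cases hp : pvP l = true
    · have hs : PySem.Str.strip l ≠ "" := by simpa [pvP] using hp
      rw [show pvBlocksGo (l :: rest) [] block = pvBlocksGo rest [] (block ++ [PySem.Str.strip l]) by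
        simp [pvBlocksGo, hs]]
      rw [ih (block ++ [PySem.Str.strip l])]
      simp [hp]
    · have hs : PySem.Str.strip l = "" := by
        by_contra hne; exact hp (by simpa [pvP] using hne)
      have hT : List.takeWhile pvP (l :: rest) = [] := by simp [hp]
      have hD : List.dropWhile pvP (l :: rest) = l :: rest := by simp [hp]
      rw [hT, hD]
      have hstep : pvBlocksGo (l :: rest) [] [] = pvBlocksGo rest [] [] := by
        simp [pvBlocksGo, hs]
      by_cases hb : block = []
      · subst hb; simp [hstep]
      · rw [show pvBlocksGo (l :: rest) [] block = pvBlocksGo rest [block] [] by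
          simp [pvBlocksGo, hs, hb]]
        rw [pvBlocksGo_acc rest [block] []]
        simp [hb, hstep]

theorem pvBOut_blocks (ls : List String) (out : List String) (r : Bool) :
    pvBOut (pvBlocksGo ls [] []) out r =
      pvBOut (pvBlocksGo (ls.dropWhile pvP) [] [])
        (out ++ pvEmit (pvFilterGo ((ls.takeWhile pvP).map PySem.Str.strip) [] r).1)
        (pvFilterGo ((ls.takeWhile pvP).map PySem.Str.strip) [] r).2 := by
  conv_lhs => rw [pvBlocksGo_decomp ls []]
  by_cases hT : (ls.takeWhile pvP).map PySem.Str.strip = []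
  · simp [hT, pvFilterGo, pvEmit]
  · have hne : ¬(([] : List String) ++ (ls.takeWhile pvP).map PySem.Str.strip = []) := by
      simpa using hT
    rw [if_neg hne, List.nil_append, List.singleton_append]
    simp only [pvBOut]
    congr 1
    simp only [pvEmit]
    split_ifs with h <;> simp_all

theorem pvIsRule_eq (s : String) :
    pvIsRule s = ((s != "") && (pvAll '=' s || pvAll '-' s || pvAll '~' s)) := by
  have hrep : ∀ (c : Char) (cs : List Char),
      ((c :: cs) == List.replicate (c :: cs).length c) = cs.all (fun x => x == c) := by
    intro c cs
    rw [Bool.eq_iff_iff, beq_iff_eq, List.all_eq_true]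
    simp [List.replicate_succ, List.eq_replicate_iff]
  cases h : s.toList with
  | nil =>
    have hs : s = "" := String.toList_eq_nil_iff.mp h
    subst hs; decide
  | cons c cs =>
    have hne : s ≠ "" := by intro e; rw [e] at h; simp at h
    have hb : (s != "") = true := by simp [hne]
    unfold pvIsRule pvAll
    rw [h, hb]
    simp only [List.headD_cons, Bool.true_and]
    rw [hrep]
    have hcont : ("=-~".toList.contains c) = (c == '=' || c == '-' || c == '~') := by
      have hm : ("=-~".toList) = ['=', '-', '~'] := by decide
      rw [hm, Bool.eq_iff_iff]
      simp [or_assoc]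
    rw [hcont, Bool.eq_iff_iff]
    simp only [Bool.and_eq_true, Bool.or_eq_true, beq_iff_eq, List.all_eq_true, List.all_cons]
    constructor
    · rintro ⟨hc, hall⟩
      rcases hc with (rfl | rfl) | rfl
      · exact Or.inl (Or.inl ⟨rfl, hall⟩)
      · exact Or.inl (Or.inr ⟨rfl, hall⟩)
      · exact Or.inr ⟨rfl, hall⟩
    · rintro ((⟨rfl, hall⟩ | ⟨rfl, hall⟩) | ⟨rfl, hall⟩)
      · exact ⟨Or.inl (Or.inl rfl), hall⟩
      · exact ⟨Or.inl (Or.inr rfl), hall⟩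
      · exact ⟨Or.inr rfl, hall⟩

theorem pvBOutFrom_cons (l : String) (rest : List String) (acc cur : List String) (r : Bool)
    (h0 : ¬ PySem.Str.strip l = "") :
    pvBOutFrom (l :: rest) acc cur r =
      (if PySem.Str.startswith (PySem.Str.strip l) ".." = true then pvBOutFrom rest acc cur r
       else if (PySem.Str.startswith (PySem.Str.strip l) "|" &&
           PySem.Str.endswith (PySem.Str.strip l) "|") = true then pvBOutFrom rest acc cur r
       else if PySem.Str.isIn ":ref:" (PySem.Str.strip l) = true then
         pvBOutFrom rest acc (cur ++ [PySem.Str.strip l]) true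
       else if r = true then
         pvBOutFrom rest acc (cur ++ [PySem.Str.strip l])
           (if PySem.Str.endswith (PySem.Str.strip l) "`" = true then false else r)
       else if pvIsRule (((List.takeWhile pvP rest).map PySem.Str.strip).headD "") = true then
         pvBOutFrom rest acc cur r
       else if pvIsRule (PySem.Str.strip l) = true then pvBOutFrom rest acc cur r
       else pvBOutFrom rest acc (cur ++ [PySem.Str.strip l]) r) := by
  have hp : pvP l = true := by simp [pvP, h0]
  unfold pvBOutFrom
  rw [show (List.takeWhile pvP (l :: rest)).map PySem.Str.strip =
        PySem.Str.strip l :: (List.takeWhile pvP rest).map PySem.Str.strip by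
      simp [hp],
    show List.dropWhile pvP (l :: rest) = List.dropWhile pvP rest by
      simp [hp]]
  simp only [pvFilterGo]
  split_ifs <;> rfl

theorem pvMain (ls : List String) (acc cur : List String) (r : Bool) :
    pvAGo ls acc cur r = pvBOutFrom ls acc cur r := by
  induction ls generalizing acc cur r with
  | nil =>
    simp only [pvAGo, pvBOutFrom, List.takeWhile_nil, List.dropWhile_nil, List.map_nil,
      pvFilterGo, pvBlocksGo, pvEmit]
    split_ifs <;> first | rfl | simp_all [pvBOut]
  | cons l rest ih =>
    by_cases h0 : PySem.Str.strip l = ""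
    · have hp : pvP l = false := by simp [pvP, h0]
      have e1 : pvBOutFrom (l :: rest) acc cur r =
          pvBOut (pvBlocksGo rest [] []) (acc ++ pvEmit cur) r := by
        unfold pvBOutFrom
        rw [show List.takeWhile pvP (l :: rest) = [] by simp [hp],
          show List.dropWhile pvP (l :: rest) = l :: rest by simp [hp],
          show pvBlocksGo (l :: rest) [] [] = pvBlocksGo rest [] [] by simp [pvBlocksGo, h0]]
        simp only [List.map_nil, pvFilterGo]
      rw [e1]
      rw [show pvAGo (l :: rest) acc cur r =
          (if cur ≠ [] then pvAGo rest (acc ++ [PySem.Str.join " " cur]) [] r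
           else pvAGo rest acc cur r) by
        simp [pvAGo, h0]]
      by_cases hc : cur = []
      · subst hc
        rw [if_neg (by simp), ih]
        rw [show pvEmit ([] : List String) = [] by simp [pvEmit], List.append_nil]
        exact (pvBOut_blocks rest acc r).symm
      · rw [if_pos hc, ih]
        rw [show pvEmit cur = [PySem.Str.join " " cur] by simp [pvEmit, hc]]
        exact (pvBOut_blocks rest (acc ++ [PySem.Str.join " " cur]) r).symm
    · rw [pvBOutFrom_cons l rest acc cur r h0]
      simp only [pvAGo]
      rw [if_neg h0]
      by_cases h1 : PySem.Str.startswith (PySem.Str.strip l) ".." = true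
      · rw [if_pos h1, if_pos h1]; exact ih _ _ _
      · rw [if_neg h1, if_neg h1]
        by_cases h2 : (PySem.Str.startswith (PySem.Str.strip l) "|" &&
            PySem.Str.endswith (PySem.Str.strip l) "|") = true
        · rw [if_pos h2, if_pos h2]; exact ih _ _ _
        · rw [if_neg h2, if_neg h2]
          by_cases h3 : PySem.Str.isIn ":ref:" (PySem.Str.strip l) = true
          · rw [if_pos h3, if_pos h3]; exact ih _ _ _
          · rw [if_neg h3, if_neg h3]
            by_cases h4 : r = true
            · rw [if_pos h4, if_pos h4]; exact ih _ _ _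
            · rw [if_neg h4, if_neg h4]
              have hrl : pvIsRule (PySem.Str.strip l) =
                  (pvAll '=' (PySem.Str.strip l) || pvAll '-' (PySem.Str.strip l) ||
                    pvAll '~' (PySem.Str.strip l)) := by
                rw [pvIsRule_eq]
                simp [h0]
              cases rest with
              | nil =>
                rw [show (((List.takeWhile pvP ([] : List String)).map PySem.Str.strip).headD "") = "" by simp]
                rw [if_neg (by decide : ¬ pvIsRule "" = true)]
                rw [hrl]
                by_cases h6 : (pvAll '=' (PySem.Str.strip l) || pvAll '-' (PySem.Str.strip l) ||
                    pvAll '~' (PySem.Str.strip l)) = true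
                · rw [if_pos h6, if_pos h6]; exact ih _ _ _
                · rw [if_neg h6, if_neg h6, if_pos h0]; exact ih _ _ _
              | cons n t =>
                have hcond : pvIsRule (((List.takeWhile pvP (n :: t)).map PySem.Str.strip).headD "") =
                    ((PySem.Str.strip n != "") &&
                      (pvAll '=' (PySem.Str.strip n) || pvAll '-' (PySem.Str.strip n) ||
                        pvAll '~' (PySem.Str.strip n))) := by
                  by_cases hn : pvP n = true
                  · rw [show (((List.takeWhile pvP (n :: t)).map PySem.Str.strip).headD "") =
                        PySem.Str.strip n by simp [hn]]
                    exact pvIsRule_eq (PySem.Str.strip n)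
                  · have hsn : (PySem.Str.strip n != "") = false := by
                      simpa [pvP] using hn
                    rw [show (((List.takeWhile pvP (n :: t)).map PySem.Str.strip).headD "") = "" by
                        simp [hn]]
                    rw [hsn, show pvIsRule "" = false from by decide]
                    simp
                rw [hcond]
                by_cases h5 : ((PySem.Str.strip n != "") &&
                    (pvAll '=' (PySem.Str.strip n) || pvAll '-' (PySem.Str.strip n) ||
                      pvAll '~' (PySem.Str.strip n))) = true
                · rw [if_pos h5, if_pos h5]; exact ih _ _ _
                · rw [if_neg h5, if_neg h5, hrl]
                  by_cases h6 : (pvAll '=' (PySem.Str.strip l) || pvAll '-' (PySem.Str.strip l) ||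
                      pvAll '~' (PySem.Str.strip l)) = true
                  · rw [if_pos h6, if_pos h6]; exact ih _ _ _
                  · rw [if_neg h6, if_neg h6, if_pos h0]; exact ih _ _ _

-- ===== VERDICT (by name: the statement is the Claim_ definition above) =====
theorem get_translatable_content_spec : Claim_equal_get_translatable_content := by
  intro rst _
  unfold Spec_get_translatable_content get_translatable_content get_translatable_content_alt
  rw [pvMain]
  conv_rhs => rw [pvBOut_blocks]
  simp [pvBOutFrom]
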